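-- pv_equiv track=rewrite | github.com/Ahemad7429/Problem-Solving | assignments/30thMarchROHANLOVES_0(2).py | find_zero_diff_indices
-- ===== SOURCE A (Python) =====
-- def find_zero_diff_indices(nums):
--     n = len(nums)
--
--     # Compute prefix sum array
--     prefix_sum = [0] * n
--     prefix_sum[0] = nums[0]
--     for i in range(1, n):
--         prefix_sum[i] = prefix_sum[i - 1] + nums[i]
--
--     # Compute suffix sum array
--     suffix_sum = [0] * n
--     suffix_sum[n - 1] = nums[n - 1]
--     for i in range(n - 2, -1, -1):
--         suffix_sum[i] = suffix_sum[i + 1] + nums[i]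
--
--     # Find indices where absolute difference between prefix sum and suffix sum is 0
--     zero_diff_indices = []
--     for i in range(n):
--         if prefix_sum[i] == suffix_sum[i]:
--             zero_diff_indices.append(i)
--
--     return zero_diff_indices
-- ===== SOURCE B (Python) =====
-- def find_zero_diff_indices(nums):
--     total = sum(nums)
--     running = 0
--     zero_diff_indices = []
--     for i, x in enumerate(nums):
--         running += x
--         if 2 * running - x == total:
--             zero_diff_indices.append(i)
--     return zero_diff_indices
-- ===== Notes on version B (the rewrite author's own statement) =====
-- stated objective: simpler
-- what changed: Replaces A's three passes and two O(n) auxiliary arrays (prefix-sum array, suffix-sum array, then a scan comparing them) with one sum() plus a single forward scan keeping a running prefix sum, emitting i when 2*running - nums[i] == total.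
import Mathlib
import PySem

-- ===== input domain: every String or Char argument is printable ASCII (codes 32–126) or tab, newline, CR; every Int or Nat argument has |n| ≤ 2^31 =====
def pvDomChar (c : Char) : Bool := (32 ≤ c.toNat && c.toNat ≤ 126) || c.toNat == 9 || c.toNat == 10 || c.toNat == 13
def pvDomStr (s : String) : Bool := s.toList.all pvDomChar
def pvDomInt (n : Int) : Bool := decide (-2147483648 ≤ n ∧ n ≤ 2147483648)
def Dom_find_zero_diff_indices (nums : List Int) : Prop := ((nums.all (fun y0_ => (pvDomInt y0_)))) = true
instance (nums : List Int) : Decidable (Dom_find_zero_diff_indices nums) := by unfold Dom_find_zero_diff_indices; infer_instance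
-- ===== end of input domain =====

-- B replaces A's three passes and two auxiliary arrays by one total plus a single running-sum scan (simpler, O(1) extra space).
-- A raises IndexError on the empty list (it reads nums[0]); Pre_ excludes it, B returns [] there.

-- ===== PORT A =====
-- the prefix-sum loop: each cell is the previous cell plus nums[i], built left to right
def pvPrefixSums : List Int → Int → List Int
  | [], _ => []
  | x :: xs, acc => (acc + x) :: pvPrefixSums xs (acc + x)

-- the suffix-sum loop: each cell is the next cell plus nums[i], built right to left
def pvSuffixSums : List Int → List Int
  | [] => []
  | x :: xs =>
    match pvSuffixSums xs with
    | [] => [x]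
    | y :: ys => (x + y) :: y :: ys

def find_zero_diff_indices (nums : List Int) : List Int :=
  let n : Int := nums.length
  let prefix_sum := pvPrefixSums nums 0
  let suffix_sum := pvSuffixSums nums
  (PySem.List.pyRange 0 n 1).foldl
    (fun acc i =>
      if PySem.List.pyGetD prefix_sum i 0 = PySem.List.pyGetD suffix_sum i 0 then acc ++ [i] else acc) []

-- ===== PORT B =====
def find_zero_diff_indices_alt (nums : List Int) : List Int :=
  let total := nums.sum
  let st :=
    (PySem.List.enumerate nums 0).foldl
      (fun (st : Int × List Int) p =>
        let running := st.1 + p.2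
        if 2 * running - p.2 = total then (running, st.2 ++ [p.1]) else (running, st.2))
      (0, [])
  st.2

-- ===== PRECONDITION & SPEC =====
-- Pre_ excludes only the empty list, on which Python A raises IndexError (it executes nums[0]).
def Pre_find_zero_diff_indices (nums : List Int) : Prop := nums ≠ []
instance (nums : List Int) : Decidable (Pre_find_zero_diff_indices nums) := by
  unfold Pre_find_zero_diff_indices; infer_instance
def pvWitness_find_zero_diff_indices : List Int := [1, 0, -1, 0, 1]

def Spec_find_zero_diff_indices (nums : List Int) (out : List Int) : Prop :=
  out = find_zero_diff_indices_alt nums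
instance (nums : List Int) (out : List Int) : Decidable (Spec_find_zero_diff_indices nums out) := by
  unfold Spec_find_zero_diff_indices; infer_instance

-- ===== CLAIM (what is proved, stated in full; the proofs are below) =====
def Claim_equal_find_zero_diff_indices : Prop :=
  ∀ (nums : List Int), Dom_find_zero_diff_indices nums → Pre_find_zero_diff_indices nums →
    Spec_find_zero_diff_indices nums (find_zero_diff_indices nums)

-- ===== LEMMAS AND PROOFS =====

-- proof-only helper: the indices B's scan emits, as a recursion
def pvIdx (xs : List Int) (s run total : Int) : List Int :=
  match xs with
  | [] => []
  | x :: t =>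
    if 2 * (run + x) - x = total then s :: pvIdx t (s + 1) (run + x) total
    else pvIdx t (s + 1) (run + x) total

lemma pvPrefixSums_eq (xs : List Int) (a : Int) :
    pvPrefixSums xs a = (List.range xs.length).map (fun k => a + (xs.take (k + 1)).sum) := by
  induction xs generalizing a with
  | nil => simp [pvPrefixSums]
  | cons x xs ih =>
    simp [pvPrefixSums, ih (a + x), List.range_succ_eq_map, Function.comp, add_assoc]

lemma pvSuffixSums_eq (xs : List Int) :
    pvSuffixSums xs = (List.range xs.length).map (fun k => (xs.drop k).sum) := by
  induction xs with
  | nil => simp [pvSuffixSums]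
  | cons x xs ih =>
    cases xs with
    | nil => simp [pvSuffixSums]
    | cons y ys =>
      rw [pvSuffixSums, ih]
      simp [List.range_succ_eq_map, Function.comp]

lemma pvA_filter (nums : List Int) :
    find_zero_diff_indices nums =
      List.map (fun (k : Nat) => (k : Int))
        (List.filter (fun k => decide ((nums.take (k + 1)).sum = (nums.drop k).sum))
          (List.range nums.length)) := by
  unfold find_zero_diff_indices
  rw [PySem.List.foldl_append_ite_eq_filter, PySem.List.pyRange_zero_nat]
  rw [List.filter_map, List.nil_append]
  apply congrArg
  apply List.filter_congr
  intro k hk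
  rw [List.mem_range] at hk
  simp only [Function.comp]
  rw [PySem.List.pyGetD_natCast, PySem.List.pyGetD_natCast, pvPrefixSums_eq, pvSuffixSums_eq]
  simp [List.getD_eq_getElem?_getD, hk]

lemma pvB_loop (xs : List Int) (s run : Int) (acc : List Int) (total : Int) :
    (PySem.List.enumerate xs s).foldl
      (fun (st : Int × List Int) p =>
        let running := st.1 + p.2
        if 2 * running - p.2 = total then (running, st.2 ++ [p.1]) else (running, st.2))
      (run, acc)
    = (run + xs.sum, acc ++ pvIdx xs s run total) := by
  induction xs generalizing s run acc with
  | nil => simp [PySem.List.enumerate_nil, pvIdx]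
  | cons x xs ih =>
    rw [PySem.List.enumerate_cons, List.foldl_cons]
    simp only []
    by_cases h : 2 * (run + x) - x = total
    · rw [if_pos h, ih]
      simp [pvIdx, h, add_assoc]
    · rw [if_neg h, ih]
      simp [pvIdx, h, add_assoc]

lemma pvIdx_eq_filter (xs : List Int) (s run total : Int) :
    pvIdx xs s run total =
      List.map (fun (k : Nat) => s + (k : Int))
        (List.filter
          (fun k => decide (2 * (run + (xs.take (k + 1)).sum) - xs.getD k 0 = total))
          (List.range xs.length)) := by
  induction xs generalizing s run with
  | nil => simp [pvIdx]
  | cons x xs ih =>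
    rw [List.length_cons, List.range_succ_eq_map, List.filter_cons, List.filter_map]
    have e1 : List.filter
        ((fun k => decide (2 * (run + ((x :: xs).take (k + 1)).sum) - (x :: xs).getD k 0 = total)) ∘ Nat.succ)
        (List.range xs.length)
        = List.filter (fun k => decide (2 * (run + x + (xs.take (k + 1)).sum) - xs.getD k 0 = total))
            (List.range xs.length) := by
      apply List.filter_congr
      intro k _
      simp [Function.comp, add_assoc]
    rw [e1]
    have e2 : ∀ l : List Nat,
        List.map (fun (k : Nat) => s + (k : Int)) (List.map Nat.succ l)
        = List.map (fun (k : Nat) => s + 1 + (k : Int)) l := by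
      intro l
      rw [List.map_map]
      apply List.map_congr_left
      intro k _
      simp only [Function.comp]
      push_cast
      ring
    have h0 : (decide (2 * (run + ((x :: xs).take (0 + 1)).sum) - (x :: xs).getD 0 0 = total))
        = decide (2 * (run + x) - x = total) := by
      simp
    by_cases h : 2 * (run + x) - x = total
    · rw [pvIdx, if_pos h]
      simp [h0, h, e2, ih]
    · rw [pvIdx, if_neg h]
      simp [h0, h, e2, ih]

lemma pvB_filter (nums : List Int) :
    find_zero_diff_indices_alt nums =
      List.map (fun (k : Nat) => (k : Int))
        (List.filter
          (fun k => decide (2 * (nums.take (k + 1)).sum - nums.getD k 0 = nums.sum))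
          (List.range nums.length)) := by
  show ((PySem.List.enumerate nums 0).foldl
      (fun (st : Int × List Int) p =>
        let running := st.1 + p.2
        if 2 * running - p.2 = nums.sum then (running, st.2 ++ [p.1]) else (running, st.2))
      (0, [])).2 = _
  rw [pvB_loop, pvIdx_eq_filter]
  simp

-- ===== VERDICT (by name: the statement is the Claim_ definition above) =====
theorem find_zero_diff_indices_spec : Claim_equal_find_zero_diff_indices := by
  intro nums _ _
  unfold Spec_find_zero_diff_indices
  rw [pvA_filter, pvB_filter]
  apply congrArg
  apply List.filter_congr
  intro k hk
  rw [List.mem_range] at hk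
  have htd : (nums.take (k + 1)).sum + (nums.drop (k + 1)).sum = nums.sum :=
    List.sum_take_add_sum_drop nums (k + 1)
  have hdk : nums.drop k = nums[k] :: nums.drop (k + 1) := List.drop_eq_getElem_cons hk
  have hg : nums.getD k 0 = nums[k] := List.getD_eq_getElem nums 0 hk
  simp only [decide_eq_decide, hdk, List.sum_cons, hg]
  omega
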